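-- pv_equiv track=rewrite | github.com/kklouzal/Docker_Proxy | squid-flask-proxy/web/icap_server.py | _literal_runs_from_regex
-- ===== SOURCE A (Python) =====
-- from typing import Dict, List, Optional, Set, Tuple
--
-- def _literal_runs_from_regex(rx: str) -> List[str]:
--     # Extract plausible literal substrings from a regex pattern.
--     # We keep runs that are likely to appear verbatim in URLs.
--     s = (rx or "")
--     out: List[str] = []
--     cur: List[str] = []
--     in_class = False
--     i = 0
--     while i < len(s):
--         ch = s[i]
--         if in_class:
--             if ch == "]":
--                 in_class = False
--             i += 1
--             continue
--         if ch == "[":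
--             if cur:
--                 out.append("".join(cur))
--                 cur = []
--             in_class = True
--             i += 1
--             continue
--         if ch == "\\":
--             if i + 1 < len(s):
--                 nxt = s[i + 1]
--                 # Common escaped literals used in adblockparser-generated regex.
--                 if nxt.isalnum() and nxt in "dDsSwWbB":
--                     if cur:
--                         out.append("".join(cur))
--                         cur = []
--                 else:
--                     # Treat unknown escapes as the escaped literal.
--                     if nxt in ".-_/:%":
--                         cur.append(nxt)
--                     elif nxt.isalnum():
--                         cur.append(nxt)
--                     else:
--                         if cur:
--                             out.append("".join(cur))
--                             cur = []
--                 i += 2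
--                 continue
--             # Trailing backslash.
--             if cur:
--                 out.append("".join(cur))
--                 cur = []
--             i += 1
--             continue
--
--         if ch.isalnum() or ch in "._-/%":
--             cur.append(ch)
--         else:
--             if cur:
--                 out.append("".join(cur))
--                 cur = []
--         i += 1
--     if cur:
--         out.append("".join(cur))
--     return out
-- ===== SOURCE B (Python) =====
-- from typing import List
--
-- def _literal_runs_from_regex(rx: str) -> List[str]:
--     # Transform-then-split: emit each kept literal char, a '\x00' sentinel at
--     # every break point, then split on the sentinel and drop empty pieces.
--     s = rx or ""
--     SEP = "\x00"
--     buf: List[str] = []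
--     i = 0
--     n = len(s)
--     while i < n:
--         ch = s[i]
--         if ch == "[":
--             buf.append(SEP)
--             j = s.find("]", i + 1)
--             i = n if j == -1 else j + 1
--             continue
--         if ch == "\\":
--             if i + 1 < n:
--                 nxt = s[i + 1]
--                 if nxt in "dDsSwWbB":
--                     buf.append(SEP)
--                 elif nxt in ".-_/:%" or nxt.isalnum():
--                     buf.append(nxt)
--                 else:
--                     buf.append(SEP)
--                 i += 2
--             else:
--                 buf.append(SEP)
--                 i += 1
--             continue
--         if ch.isalnum() or ch in "._-/%":
--             buf.append(ch)
--         else: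
--             buf.append(SEP)
--         i += 1
--     return [run for run in "".join(buf).split(SEP) if run]
-- ===== Notes on version B (the rewrite author's own statement) =====
-- stated objective: alternative
-- what changed: Replaced A's accumulate-and-flush loop (cur buffer flushed into out at every break) by a transform-then-split decomposition: one pass emits kept literal characters plus a '\x00' sentinel at each break point (skipping character classes via str.find), then the result is split on the sentinel and empty pieces are dropped.
import Mathlib
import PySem

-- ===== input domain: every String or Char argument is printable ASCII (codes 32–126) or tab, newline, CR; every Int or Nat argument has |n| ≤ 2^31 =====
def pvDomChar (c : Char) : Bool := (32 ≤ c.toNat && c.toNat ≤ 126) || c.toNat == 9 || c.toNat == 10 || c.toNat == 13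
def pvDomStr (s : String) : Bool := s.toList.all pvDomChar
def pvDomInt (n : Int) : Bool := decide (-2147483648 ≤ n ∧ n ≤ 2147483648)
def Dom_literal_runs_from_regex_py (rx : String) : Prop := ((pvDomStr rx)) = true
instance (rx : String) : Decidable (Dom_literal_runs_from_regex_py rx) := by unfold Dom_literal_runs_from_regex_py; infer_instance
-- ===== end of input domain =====

-- B replaces A's accumulate-and-flush loop by a transform-then-split decomposition
-- (emit kept literal chars plus a '\x00' sentinel at break points, then split and
-- drop empty pieces); objective: simpler/alternative decomposition, same cost.


-- ===== PORT A =====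
-- A's while loop: state (cur, out, in_class), flush cur at every break point.
def aLoop : List Char → List Char → List String → Bool → List String
  | [], cur, out, _ => if cur ≠ [] then out ++ [String.mk cur] else out
  | c :: rest, cur, out, inClass =>
    if inClass then
      if c = ']' then aLoop rest cur out false else aLoop rest cur out true
    else if c = '[' then
      aLoop rest [] (if cur ≠ [] then out ++ [String.mk cur] else out) true
    else if c = '\\' then
      match rest with
      | nxt :: rest2 =>
        if PySem.Chars.isalnum nxt && "dDsSwWbB".toList.contains nxt then
          aLoop rest2 [] (if cur ≠ [] then out ++ [String.mk cur] else out) false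
        else if ".-_/:%".toList.contains nxt then
          aLoop rest2 (cur ++ [nxt]) out false
        else if PySem.Chars.isalnum nxt then
          aLoop rest2 (cur ++ [nxt]) out false
        else
          aLoop rest2 [] (if cur ≠ [] then out ++ [String.mk cur] else out) false
      | [] => -- trailing backslash: flush, i += 1, loop ends
          aLoop [] [] (if cur ≠ [] then out ++ [String.mk cur] else out) false
    else if PySem.Chars.isalnum c || "._-/%".toList.contains c then
      aLoop rest (cur ++ [c]) out false
    else
      aLoop rest [] (if cur ≠ [] then out ++ [String.mk cur] else out) false
  termination_by l _ _ _ => l.length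
  decreasing_by all_goals (simp only [List.length_cons]; omega)

def literal_runs_from_regex_py (rx : String) : List String :=
  aLoop rx.toList [] [] false

-- ===== PORT B =====
-- B's while loop: build the transformed buffer ('\x00' = sentinel at a break;
-- s.find("]", i+1) + jump is ported as dropWhile-to-']' then drop 1).
def bBuf : List Char → List Char
  | [] => []
  | c :: rest =>
    if c = '[' then
      '\x00' :: bBuf ((rest.dropWhile (· ≠ ']')).drop 1)
    else if c = '\\' then
      match rest with
      | nxt :: rest2 =>
        (if "dDsSwWbB".toList.contains nxt then '\x00'
         else if ".-_/:%".toList.contains nxt || PySem.Chars.isalnum nxt then nxt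
         else '\x00') :: bBuf rest2
      | [] => ['\x00']
    else
      (if PySem.Chars.isalnum c || "._-/%".toList.contains c then c else '\x00') :: bBuf rest
  termination_by l => l.length
  decreasing_by
    · have h1 := List.length_dropWhile_le (fun x => decide (x ≠ ']')) rest
      simp only [List.length_drop, List.length_cons]
      omega
    all_goals (simp only [List.length_cons]; omega)

def literal_runs_from_regex_py_alt (rx : String) : List String :=
  ((PySem.Chars.splitOn (bBuf rx.toList) ['\x00']).filter (· ≠ [])).map String.mk

-- ===== PRECONDITION & SPEC =====
def Spec_literal_runs_from_regex_py (rx : String) (out : List String) : Prop := out = literal_runs_from_regex_py_alt rx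
instance (rx : String) (out : List String) : Decidable (Spec_literal_runs_from_regex_py rx out) := by unfold Spec_literal_runs_from_regex_py; infer_instance

-- ===== CLAIM (what is proved, stated in full; the proofs are below) =====
def Claim_equal_literal_runs_from_regex_py : Prop := ∀ (rx : String), Dom_literal_runs_from_regex_py rx → Spec_literal_runs_from_regex_py rx (literal_runs_from_regex_py rx)

-- ===== LEMMAS AND PROOFS =====

-- reference splitter for single-char separator '\x00'
def mySplit : List Char → List (List Char)
  | [] => [[]]
  | c :: rest => if c = '\x00' then [] :: mySplit rest else (mySplit rest).modifyHead (c :: ·)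

theorem mySplit_ne_nil (l : List Char) : mySplit l ≠ [] := by
  induction l with
  | nil => simp [mySplit]
  | cons c rest ih =>
    simp only [mySplit]
    split
    · simp
    · intro h
      apply ih
      cases hs : mySplit rest with
      | nil => rfl
      | cons a t => rw [hs] at h; simp [List.modifyHead] at h

theorem modifyHead_id' {α : Type} (l : List α) : List.modifyHead (fun x => x) l = l := by
  cases l <;> simp

theorem splitOn_go_eq (fuel : Nat) (l cur : List Char) (accs : List (List Char))
    (h : l.length < fuel) :
    PySem.Chars.splitOn.go ['\x00'] fuel l cur accs =
      accs.reverse ++ (mySplit l).modifyHead (cur.reverse ++ ·) := by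
  induction fuel generalizing l cur accs with
  | zero => omega
  | succ f ih =>
    cases l with
    | nil => simp [PySem.Chars.splitOn.go, mySplit]
    | cons c rest =>
      by_cases hc : c = '\x00'
      · subst hc
        have hstep : PySem.Chars.splitOn.go ['\x00'] (f + 1) ('\x00' :: rest) cur accs =
            PySem.Chars.splitOn.go ['\x00'] f rest [] (cur.reverse :: accs) := by
          simp [PySem.Chars.splitOn.go, List.isPrefixOf]
        rw [hstep, ih rest [] (cur.reverse :: accs) (by simp at h; omega)]
        simp [mySplit, modifyHead_id']
      · have hstep : PySem.Chars.splitOn.go ['\x00'] (f + 1) (c :: rest) cur accs =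
            PySem.Chars.splitOn.go ['\x00'] f rest (c :: cur) accs := by
          simp [PySem.Chars.splitOn.go, List.isPrefixOf]
          intro heq; exact absurd heq.symm hc
        rw [hstep, ih rest (c :: cur) accs (by simp at h; omega)]
        obtain ⟨a, t, hs⟩ : ∃ a t, mySplit rest = a :: t := by
          cases hsp : mySplit rest with
          | nil => exact absurd hsp (mySplit_ne_nil rest)
          | cons a t => exact ⟨a, t, rfl⟩
        simp [mySplit, hc, hs, List.modifyHead]

theorem splitOn_eq (l : List Char) :
    PySem.Chars.splitOn l ['\x00'] = mySplit l := by
  rw [PySem.Chars.splitOn, splitOn_go_eq _ _ _ _ (by omega)]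
  obtain ⟨a, t, hs⟩ : ∃ a t, mySplit l = a :: t := by
    cases hsp : mySplit l with
    | nil => exact absurd hsp (mySplit_ne_nil l)
    | cons a t => exact ⟨a, t, rfl⟩
  simp [hs, List.modifyHead]

theorem dom_ne_sep {c : Char} (h : pvDomChar c = true) : c ≠ '\x00' := by
  rintro rfl; exact absurd h (by decide)

theorem mySplit_eq_cons (l : List Char) : ∃ a t, mySplit l = a :: t := by
  cases hsp : mySplit l with
  | nil => exact absurd hsp (mySplit_ne_nil l)
  | cons a t => exact ⟨a, t, rfl⟩

theorem mySplit_append (cur l : List Char) (h : '\x00' ∉ cur) :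
    mySplit (cur ++ l) = (mySplit l).modifyHead (cur ++ ·) := by
  induction cur with
  | nil => simp [modifyHead_id']
  | cons c cs ih =>
    have hc : ¬ (c = '\x00') := by rintro rfl; exact h List.mem_cons_self
    have h' : '\x00' ∉ cs := fun hm => h (List.mem_cons_of_mem _ hm)
    obtain ⟨a, t, hs⟩ := mySplit_eq_cons l
    rw [List.cons_append]
    simp only [mySplit, if_neg hc, ih h', hs, List.modifyHead, List.cons_append]

theorem break_lemma (cur b : List Char) (out : List String) (h : '\x00' ∉ cur) :
    out ++ ((mySplit (cur ++ '\x00' :: b)).filter (· ≠ [])).map String.mk =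
      (if cur ≠ [] then out ++ [String.mk cur] else out) ++
        ((mySplit b).filter (· ≠ [])).map String.mk := by
  rw [mySplit_append _ _ h]
  have : mySplit ('\x00' :: b) = [] :: mySplit b := by simp [mySplit]
  rw [this]
  by_cases hcur : cur = []
  · subst hcur; simp [List.modifyHead]
  · simp [List.modifyHead, hcur]

theorem base_lemma (cur : List Char) (out : List String) (h : '\x00' ∉ cur) :
    (if cur ≠ [] then out ++ [String.mk cur] else out) =
      out ++ ((mySplit (cur ++ bBuf [])).filter (· ≠ [])).map String.mk := by
  have hb : bBuf [] = ([] : List Char) := by rw [bBuf]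
  have hms : mySplit cur = [cur] := by
    have := mySplit_append cur [] h
    simpa [mySplit, List.modifyHead] using this
  rw [hb, List.append_nil, hms]
  by_cases hcur : cur = []
  · subst hcur; simp
  · simp [hcur]

theorem alnum_of_mem_dD {nxt : Char} (h : "dDsSwWbB".toList.contains nxt = true) :
    PySem.Chars.isalnum nxt = true := by
  have e : "dDsSwWbB".toList = ['d', 'D', 's', 'S', 'w', 'W', 'b', 'B'] := by decide
  rw [e] at h
  simp only [List.contains_eq_mem, decide_eq_true_eq, List.mem_cons, List.not_mem_nil, or_false] at h
  rcases h with rfl | rfl | rfl | rfl | rfl | rfl | rfl | rfl <;> decide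

theorem mem_skip {c : Char} {l : List Char} (h : c ∈ (l.dropWhile (· ≠ ']')).drop 1) : c ∈ l :=
  ((List.drop_sublist 1 _).trans (List.dropWhile_sublist _)).subset h

theorem len_skip (l : List Char) : ((l.dropWhile (· ≠ ']')).drop 1).length ≤ l.length :=
  ((List.drop_sublist 1 _).trans (List.dropWhile_sublist _)).length_le

theorem notmem_append_single {cur : List Char} {c : Char} (hcur : '\x00' ∉ cur)
    (hc : c ≠ '\x00') : '\x00' ∉ cur ++ [c] := by
  intro hm
  rcases List.mem_append.1 hm with h | h
  · exact hcur h
  · simp at h; exact hc h.symm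

theorem aLoop_class (l : List Char) : ∀ (cur : List Char) (out : List String),
    aLoop l cur out true = aLoop ((l.dropWhile (· ≠ ']')).drop 1) cur out false := by
  induction l with
  | nil =>
    intro cur out
    simp only [List.dropWhile_nil, List.drop_nil]
    simp only [aLoop.eq_def]
  | cons c rest ih =>
    intro cur out
    by_cases hc : c = ']'
    · subst hc
      simp only [List.dropWhile_cons, decide_eq_true_eq]
      rw [aLoop.eq_def]
      simp
    · simp only [List.dropWhile_cons, decide_eq_true_eq, if_pos hc]
      rw [aLoop.eq_def]
      simp only [if_neg hc]
      exact ih cur out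

theorem aLoop_eq (n : Nat) : ∀ (l cur : List Char) (out : List String),
    l.length ≤ n → (∀ c ∈ l, pvDomChar c = true) → '\x00' ∉ cur →
    aLoop l cur out false =
      out ++ ((mySplit (cur ++ bBuf l)).filter (· ≠ [])).map String.mk := by
  induction n with
  | zero =>
    intro l cur out hlen _ hcur
    have hl : l = [] := List.eq_nil_of_length_eq_zero (by omega)
    subst hl
    simpa [aLoop] using base_lemma cur out hcur
  | succ n ih =>
    intro l cur out hlen hdom hcur
    cases l with
    | nil => simpa [aLoop] using base_lemma cur out hcur
    | cons c rest =>
      have hdomc : pvDomChar c = true := hdom c List.mem_cons_self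
      have hdomr : ∀ x ∈ rest, pvDomChar x = true := fun x hx => hdom x (List.mem_cons_of_mem _ hx)
      by_cases h1 : c = '['
      · -- character class: both sides skip to after ']'
        subst h1
        have hlen' : ((rest.dropWhile (· ≠ ']')).drop 1).length ≤ n := by
          have := len_skip rest; simp at hlen; omega
        have hstepA : aLoop ('[' :: rest) cur out false =
            aLoop ((rest.dropWhile (· ≠ ']')).drop 1) []
              (if cur ≠ [] then out ++ [String.mk cur] else out) false := by
          rw [aLoop.eq_def]
          simp only [Bool.false_eq_true, if_false]
          exact aLoop_class rest _ _
        have hstepB : bBuf ('[' :: rest) = '\x00' :: bBuf ((rest.dropWhile (· ≠ ']')).drop 1) := by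
          rw [bBuf.eq_def]
          simp
        rw [hstepA, ih _ [] _ hlen' (fun x hx => hdomr x (mem_skip hx)) (by simp),
          hstepB, break_lemma _ _ _ hcur]
        simp
      · by_cases h2 : c = '\\'
        · subst h2
          cases rest with
          | nil =>
            have hstepA : aLoop ['\\'] cur out false =
                (if cur ≠ [] then out ++ [String.mk cur] else out) := by
              rw [aLoop.eq_def]
              simp only [Bool.false_eq_true, if_false, if_neg (show ¬ ('\\' = '[') by decide)]
              rw [aLoop.eq_def]
              simp
            have hstepB : bBuf ['\\'] = ['\x00'] := by rw [bBuf.eq_def]; simp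
            rw [hstepA, hstepB]
            have := break_lemma cur [] out hcur
            simp only [mySplit, List.filter] at this ⊢
            simpa using this.symm
          | cons nxt rest2 =>
            have hdomn : pvDomChar nxt = true := hdomr nxt List.mem_cons_self
            have hdomr2 : ∀ x ∈ rest2, pvDomChar x = true :=
              fun x hx => hdomr x (List.mem_cons_of_mem _ hx)
            have hlen2 : rest2.length ≤ n := by simp at hlen; omega
            have hunfA : aLoop ('\\' :: nxt :: rest2) cur out false =
                (if PySem.Chars.isalnum nxt && "dDsSwWbB".toList.contains nxt then
                  aLoop rest2 [] (if cur ≠ [] then out ++ [String.mk cur] else out) false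
                else if ".-_/:%".toList.contains nxt then aLoop rest2 (cur ++ [nxt]) out false
                else if PySem.Chars.isalnum nxt then aLoop rest2 (cur ++ [nxt]) out false
                else aLoop rest2 [] (if cur ≠ [] then out ++ [String.mk cur] else out) false) := by
              rw [aLoop.eq_def]
              simp only [Bool.false_eq_true, if_false, if_neg (show ¬ ('\\' = '[') by decide)]
              simp
            have hunfB : bBuf ('\\' :: nxt :: rest2) =
                (if "dDsSwWbB".toList.contains nxt then '\x00'
                 else if ".-_/:%".toList.contains nxt || PySem.Chars.isalnum nxt then nxt
                 else '\x00') :: bBuf rest2 := by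
              rw [bBuf.eq_def]
              simp only [if_neg (show ¬ ('\\' = '[') by decide)]
              simp
            by_cases hd : "dDsSwWbB".toList.contains nxt = true
            · rw [hunfA, if_pos (by rw [alnum_of_mem_dD hd, hd]; rfl),
                ih _ [] _ hlen2 hdomr2 (by simp), hunfB, if_pos hd, break_lemma _ _ _ hcur]
              simp
            · have hkeep : ∀ (hk : nxt ≠ '\x00'),
                  aLoop rest2 (cur ++ [nxt]) out false =
                    out ++ ((mySplit (cur ++ (nxt :: bBuf rest2))).filter (· ≠ [])).map String.mk := by
                intro hk
                rw [ih _ (cur ++ [nxt]) _ hlen2 hdomr2 (notmem_append_single hcur hk)]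
                rw [show cur ++ nxt :: bBuf rest2 = (cur ++ [nxt]) ++ bBuf rest2 by simp]
              by_cases hp : ".-_/:%".toList.contains nxt = true
              · rw [hunfA, if_neg (show ¬ ((PySem.Chars.isalnum nxt && "dDsSwWbB".toList.contains nxt) = true) by rw [Bool.and_eq_true]; rintro ⟨-, hb⟩; exact hd hb), if_pos hp,
                  hkeep (dom_ne_sep hdomn), hunfB, if_neg hd, if_pos (show ((".-_/:%".toList.contains nxt || PySem.Chars.isalnum nxt) = true) by rw [Bool.or_eq_true]; exact Or.inl hp)]
              · by_cases ha : PySem.Chars.isalnum nxt = true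
                · rw [hunfA, if_neg (show ¬ ((PySem.Chars.isalnum nxt && "dDsSwWbB".toList.contains nxt) = true) by rw [Bool.and_eq_true]; rintro ⟨-, hb⟩; exact hd hb), if_neg hp, if_pos ha,
                    hkeep (dom_ne_sep hdomn), hunfB, if_neg hd, if_pos (show ((".-_/:%".toList.contains nxt || PySem.Chars.isalnum nxt) = true) by rw [Bool.or_eq_true]; exact Or.inr ha)]
                · rw [hunfA, if_neg (show ¬ ((PySem.Chars.isalnum nxt && "dDsSwWbB".toList.contains nxt) = true) by rw [Bool.and_eq_true]; rintro ⟨-, hb⟩; exact hd hb), if_neg hp, if_neg ha,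
                    ih _ [] _ hlen2 hdomr2 (by simp), hunfB, if_neg hd,
                    if_neg (show ¬ ((".-_/:%".toList.contains nxt || PySem.Chars.isalnum nxt) = true) by rw [Bool.or_eq_true]; rintro (h | h); exacts [hp h, ha h]), break_lemma _ _ _ hcur]
                  simp
        · have hlen' : rest.length ≤ n := by simp at hlen; omega
          have hunfA : aLoop (c :: rest) cur out false =
              (if PySem.Chars.isalnum c || "._-/%".toList.contains c then
                aLoop rest (cur ++ [c]) out false
              else aLoop rest [] (if cur ≠ [] then out ++ [String.mk cur] else out) false) := by
            rw [aLoop.eq_def]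
            simp only [Bool.false_eq_true, if_false, if_neg h1, if_neg h2]
          have hunfB : bBuf (c :: rest) =
              (if PySem.Chars.isalnum c || "._-/%".toList.contains c then c else '\x00') :: bBuf rest := by
            rw [bBuf.eq_def]
            simp only [if_neg h1, if_neg h2]
          by_cases hk : (PySem.Chars.isalnum c || "._-/%".toList.contains c) = true
          · rw [hunfA, if_pos hk, ih _ (cur ++ [c]) _ hlen' hdomr
              (notmem_append_single hcur (dom_ne_sep hdomc)),
              hunfB, if_pos hk,
              show cur ++ c :: bBuf rest = (cur ++ [c]) ++ bBuf rest by simp]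
          · rw [hunfA, if_neg hk, ih _ [] _ hlen' hdomr (by simp), hunfB, if_neg hk,
              break_lemma _ _ _ hcur]
            simp

theorem literal_runs_from_regex_py_spec : Claim_equal_literal_runs_from_regex_py := by
  intro rx hdom
  unfold Spec_literal_runs_from_regex_py literal_runs_from_regex_py literal_runs_from_regex_py_alt
  rw [splitOn_eq]
  have hdom' : ∀ c ∈ rx.toList, pvDomChar c = true := by
    have := hdom
    unfold Dom_literal_runs_from_regex_py pvDomStr at this
    simpa [List.all_eq_true] using this
  simpa using aLoop_eq rx.toList.length rx.toList [] [] le_rfl hdom' (by simp)
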